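-- pv_equiv track=rewrite | github.com/jcraig949jfi/Prometheus | prometheus_math/discovery_env_v2.py | _palindromic_from_half
-- ===== SOURCE A (Python) =====
-- from typing import Any, Callable, Dict, List, Optional, Sequence, Tuple
--
-- def _palindromic_from_half(half: List[int], degree: int) -> List[int]:
--     """Mirror a half-vector into a palindromic polynomial.
--
--     Same convention as v1: ``out[i] = half[i]`` for ``i <= degree//2``,
--     ``out[degree-i] = half[i]`` for the mirrored entries.
--     """
--     if degree < 2:
--         raise ValueError(f"degree must be >= 2; got {degree}")
--     n = degree + 1
--     out = [0] * n
--     half_len = (degree // 2) + 1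
--     if len(half) < half_len:
--         raise ValueError(
--             f"need {half_len} half-coeffs for degree {degree}; got {len(half)}"
--         )
--     for i in range(half_len):
--         out[i] = half[i]
--         out[degree - i] = half[i]
--     return out
-- ===== SOURCE B (Python) =====
-- def _palindromic_from_half(half, degree):
--     """Mirror a half-vector into a palindromic polynomial (slice + reversed concatenation)."""
--     if degree < 2:
--         raise ValueError(f"degree must be >= 2; got {degree}")
--     half_len = (degree // 2) + 1
--     if len(half) < half_len:
--         raise ValueError(
--             f"need {half_len} half-coeffs for degree {degree}; got {len(half)}"
--         )
--     prefix = half[:half_len]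
--     return prefix + prefix[: degree + 1 - half_len][::-1]
-- ===== Notes on version B (the rewrite author's own statement) =====
-- stated objective: alternative
-- what changed: Replaces the index-by-index scatter loop into a preallocated zero list with whole-list slice operations: take the prefix slice once and concatenate it with the reversed copy of its first degree+1-half_len elements, so no element-level indexing or loop remains.
import Mathlib
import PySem

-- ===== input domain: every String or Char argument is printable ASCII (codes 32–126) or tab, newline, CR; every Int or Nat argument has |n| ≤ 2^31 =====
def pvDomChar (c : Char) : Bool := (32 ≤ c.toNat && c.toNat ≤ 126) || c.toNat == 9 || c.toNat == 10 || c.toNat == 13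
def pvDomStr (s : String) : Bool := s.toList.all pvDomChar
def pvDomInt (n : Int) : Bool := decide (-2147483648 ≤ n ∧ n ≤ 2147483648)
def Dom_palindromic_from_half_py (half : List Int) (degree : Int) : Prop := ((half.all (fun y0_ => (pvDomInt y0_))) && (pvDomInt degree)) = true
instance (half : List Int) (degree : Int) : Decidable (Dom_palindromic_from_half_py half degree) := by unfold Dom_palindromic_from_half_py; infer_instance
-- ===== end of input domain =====

-- B builds the palindrome by whole-list slice operations (prefix slice ++ reversed copy of its
-- relevant part) instead of A's element-by-element scatter loop into a preallocated zero list.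

-- ===== PORT A =====
-- scatter loop: out = [0]*(degree+1); for i in range(degree//2+1): out[i] = half[i]; out[degree-i] = half[i]
def palindromic_from_half_py (half : List Int) (degree : Int) : List Int :=
  let n := degree + 1
  let out : List Int := List.replicate n.toNat 0
  let half_len := PySem.Int.floordiv degree 2 + 1
  (PySem.List.pyRange 0 half_len).foldl (fun out i =>
    let v := PySem.List.pyGetD half i 0   -- half[i]; in range under Pre_
    (out.set i.toNat v).set (degree - i).toNat v) out   -- out[i] = v; out[degree-i] = v (indices nonneg/in range under Pre_)

-- ===== PORT B =====
-- prefix = half[:half_len]; return prefix + prefix[:degree+1-half_len][::-1]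
def palindromic_from_half_py_alt (half : List Int) (degree : Int) : List Int :=
  let half_len := PySem.Int.floordiv degree 2 + 1
  let pref := PySem.List.slice half none (some half_len)
  -- [::-1] is List.reverse (PySem.List.slice?_none_none_neg_one)
  pref ++ (PySem.List.slice pref none (some (degree + 1 - half_len))).reverse

-- ===== PRECONDITION & SPEC =====
-- Pre_ excludes exactly the two ValueError branches of A (degree < 2, or fewer than degree//2+1 half-coeffs).
def Pre_palindromic_from_half_py (half : List Int) (degree : Int) : Prop :=
  2 ≤ degree ∧ PySem.Int.floordiv degree 2 + 1 ≤ (half.length : Int)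
instance (half : List Int) (degree : Int) : Decidable (Pre_palindromic_from_half_py half degree) := by
  unfold Pre_palindromic_from_half_py; infer_instance

def pvWitness_palindromic_from_half_py : List Int × Int := ([3, 5], 3)

def Spec_palindromic_from_half_py (half : List Int) (degree : Int) (out : List Int) : Prop := out = palindromic_from_half_py_alt half degree
instance (half : List Int) (degree : Int) (out : List Int) : Decidable (Spec_palindromic_from_half_py half degree out) := by unfold Spec_palindromic_from_half_py; infer_instance

-- ===== CLAIM (what is proved, stated in full; the proofs are below) =====
def Claim_equal_palindromic_from_half_py : Prop := ∀ (half : List Int) (degree : Int), Dom_palindromic_from_half_py half degree → Pre_palindromic_from_half_py half degree → Spec_palindromic_from_half_py half degree (palindromic_from_half_py half degree)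

-- ===== LEMMAS AND PROOFS =====

-- Nat-side characterisation of A's scatter loop after k iterations.
lemma pvLoop_char (half : List Int) (d k : Nat) (hk : k ≤ d / 2 + 1) (hd : 2 ≤ d) :
    (List.range k).foldl
      (fun out i => ((out.set i (half.getD i 0)).set (d - i) (half.getD i 0)))
      (List.replicate (d + 1) 0)
    = (List.range (d + 1)).map (fun j =>
        if j < k then half.getD j 0 else if d - j < k then half.getD (d - j) 0 else 0) := by
  induction k with
  | zero =>
    simp
  | succ k ih =>
    rw [List.range_succ, List.foldl_append, ih (by omega)]
    simp only [List.foldl_cons, List.foldl_nil]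
    apply List.ext_getElem
    · simp
    intro j h1 h2
    have hjd : j < d + 1 := by simpa using h2
    simp only [List.getElem_set, List.getElem_map, List.getElem_range]
    split_ifs <;>
      first
        | rfl
        | omega
        | exact congrArg (fun t => half[t]?.getD 0) (by omega)

-- ===== VERDICT (by name: the statement is the Claim_ definition above) =====
theorem palindromic_from_half_py_spec : Claim_equal_palindromic_from_half_py := by
  intro half degree _ hpre
  obtain ⟨hd2, hlen⟩ := hpre
  unfold Spec_palindromic_from_half_py palindromic_from_half_py palindromic_from_half_py_alt
  obtain ⟨d, rfl⟩ : ∃ d : Nat, degree = (d : Int) := ⟨degree.toNat, by omega⟩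
  have hd : 2 ≤ d := by exact_mod_cast hd2
  have hflo : PySem.Int.floordiv (d : Int) 2 = ((d / 2 : Nat) : Int) := by
    exact_mod_cast PySem.Int.floordiv_natCast d 2
  have hlenN : d / 2 + 1 ≤ half.length := by
    rw [hflo] at hlen; exact_mod_cast hlen
  simp only [hflo]
  have h1 : ((d : Int) + 1) = ((d + 1 : Nat) : Int) := by push_cast; ring
  have h2 : ((d / 2 : Nat) : Int) + 1 = ((d / 2 + 1 : Nat) : Int) := by push_cast; ring
  rw [h1, h2, PySem.List.pyRange_zero_natCast, List.foldl_map, Int.toNat_natCast]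
  -- B's slices on Nat bounds
  have h3 : ((d + 1 : Nat) : Int) - ((d / 2 + 1 : Nat) : Int) = ((d + 1 - (d / 2 + 1) : Nat) : Int) := by
    omega
  rw [h3, PySem.List.slice_to_natCast, PySem.List.slice_to_natCast]
  -- rewrite A's loop body into the Nat-side step
  have hbody :
      (List.range (d / 2 + 1)).foldl
        (fun out (i : Nat) =>
          ((out.set ((i : Int)).toNat (PySem.List.pyGetD half (i : Int) 0)).set
            (((d : Int) - (i : Int)).toNat) (PySem.List.pyGetD half (i : Int) 0)))
        (List.replicate (d + 1) 0)
      = (List.range (d / 2 + 1)).foldl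
        (fun out i => ((out.set i (half.getD i 0)).set (d - i) (half.getD i 0)))
        (List.replicate (d + 1) 0) := by
    apply PySem.List.foldl_congr_mem
    intro out i hi
    simp only [PySem.List.pyGetD_natCast, Int.toNat_natCast, Int.toNat_sub]
  rw [hbody, pvLoop_char half d (d / 2 + 1) (le_refl _) hd]
  -- reconcile the map form with prefix ++ reversed-prefix-part
  apply List.ext_getElem
  · simp; omega
  intro j h1' h2'
  have hjd : j < d + 1 := by simpa using h1'
  have hplen : (half.take (d / 2 + 1)).length = d / 2 + 1 := by
    simp; omega
  have htlen : ((half.take (d / 2 + 1)).take (d + 1 - (d / 2 + 1))).length = d + 1 - (d / 2 + 1) := by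
    simp; omega
  simp only [List.getElem_map, List.getElem_range]
  by_cases hlo : j < d / 2 + 1
  · rw [List.getElem_append_left (by omega), List.getElem_take]
    simp only [if_pos hlo, List.getD_eq_getElem?_getD, List.getElem?_eq_getElem (by omega : j < half.length)]
    rfl
  · have hdj : d - j < d / 2 + 1 := by omega
    rw [List.getElem_append_right (by omega)]
    rw [List.getElem_reverse]
    rw [List.getElem_take, List.getElem_take]
    simp only [if_neg hlo, if_pos hdj, List.getD_eq_getElem?_getD,
      List.getElem?_eq_getElem (by omega : d - j < half.length)]
    have : ((half.take (d/2+1)).take (d+1-(d/2+1))).length - 1 - (j - (half.take (d/2+1)).length) = d - j := by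
      rw [htlen, hplen]; omega
    simp only [this]
    rfl
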